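-- pv_equiv track=rewrite | github.com/BinxiaoPan/Binxiao | Leetcode/#476 Number Complement.py | findComplement
-- ===== SOURCE A (Python) =====
-- def findComplement(num):
--     """
--     :type num: int
--     :rtype: int
--     """
--     lst = []
--
--     while num > 0:
--         lst.append(num % 2)
--         num = num // 2
--
--     lst = [1 - x for x in lst]
--
--     num = 0
--
--     for i in lst[::-1]:
--         num = num*2 + i
--
--     return num
-- ===== SOURCE B (Python) =====
-- def findComplement(num):
--     """
--     :type num: int
--     :rtype: int
--     """
--     if num <= 0:
--         return 0
--     return num ^ ((1 << num.bit_length()) - 1)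
-- ===== Notes on version B (the rewrite author's own statement) =====
-- stated objective: idiomatic
-- what changed: Replaces A's decompose-into-bits / flip / recompose loops with one closed-form bitmask expression num ^ ((1 << num.bit_length()) - 1), with 0 as the base case for non-positive input (where A's loop never runs).
import Mathlib
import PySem

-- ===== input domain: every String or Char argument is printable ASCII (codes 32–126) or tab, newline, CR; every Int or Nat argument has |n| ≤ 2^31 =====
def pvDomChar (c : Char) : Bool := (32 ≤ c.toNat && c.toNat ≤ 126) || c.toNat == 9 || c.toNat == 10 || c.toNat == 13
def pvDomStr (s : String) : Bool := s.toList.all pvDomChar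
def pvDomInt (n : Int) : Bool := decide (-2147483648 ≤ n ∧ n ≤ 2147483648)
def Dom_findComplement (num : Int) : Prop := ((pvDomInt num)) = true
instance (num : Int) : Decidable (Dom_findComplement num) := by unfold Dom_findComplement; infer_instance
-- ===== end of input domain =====

-- B replaces A's decompose-into-bits / flip / recompose loops with the closed-form
-- bitmask expression num ^ ((1 << num.bit_length()) - 1), returning 0 for non-positive num
-- (where A's loop never runs); objective: idiomatic, same asymptotic cost.


-- ===== PORT A =====
-- the 'while num > 0' loop: collects num % 2 and halves, low bit first
def pvBitsA (num : Int) : List Int :=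
  if 0 < num then PySem.Int.mod num 2 :: pvBitsA (PySem.Int.floordiv num 2) else []
termination_by num.toNat
decreasing_by
  rename_i h
  rw [PySem.Int.floordiv_eq_ediv_of_pos (by omega)]
  omega

def findComplement (num : Int) : Int :=
  let lst := pvBitsA num
  let lst' := lst.map (fun x => 1 - x)          -- [1 - x for x in lst]
  -- for i in lst[::-1]: num = num*2 + i
  (lst'.reverse).foldl (fun n i => n * 2 + i) 0

-- ===== PORT B =====
-- num.bit_length() → PySem.Int.bitLength; '^' → PySem.Int.bxor; '1 << k' → (1 : Int) <<< k
def findComplement_alt (num : Int) : Int :=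
  if num ≤ 0 then 0
  else PySem.Int.bxor num (((1 : Int) <<< PySem.Int.bitLength num) - 1)

-- ===== PRECONDITION & SPEC =====
def Spec_findComplement (num : Int) (out : Int) : Prop := out = findComplement_alt num
instance (num : Int) (out : Int) : Decidable (Spec_findComplement num out) := by unfold Spec_findComplement; infer_instance

-- ===== CLAIM (what is proved, stated in full; the proofs are below) =====
def Claim_equal_findComplement : Prop := ∀ (num : Int), Dom_findComplement num → Spec_findComplement num (findComplement num)

-- ===== LEMMAS AND PROOFS =====

-- the fold over the reversed list, one step
theorem fold_rev_cons (x : Int) (l : List Int) :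
    ((x :: l).reverse).foldl (fun n i => n * 2 + i) 0
      = (l.reverse).foldl (fun n i => n * 2 + i) 0 * 2 + x := by
  simp [List.reverse_cons, List.foldl_append]

-- n xored with an all-ones mask covering it is the mask minus n
theorem xor_two_pow_sub_one (k : Nat) : ∀ n : Nat, n < 2 ^ k → n ^^^ (2 ^ k - 1) = 2 ^ k - 1 - n := by
  induction k with
  | zero => intro n h; interval_cases n; decide
  | succ k ih =>
    intro n h
    have hd : Nat.bit (n % 2 = 1) (n >>> 1) = n := Nat.bit_decide_mod_two_eq_one_shiftRight_one n
    have hm : (2 : Nat) ^ (k + 1) - 1 = Nat.bit true (2 ^ k - 1) := by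
      rw [Nat.bit_val]; simp [Nat.pow_succ]; omega
    have hlt : n >>> 1 < 2 ^ k := by
      rw [Nat.shiftRight_one]; rw [Nat.pow_succ] at h; omega
    have hlt' : n / 2 < 2 ^ k := by rw [← Nat.shiftRight_one]; exact hlt
    rw [← hd, hm, Nat.xor_bit, ih _ hlt]
    rw [Nat.bit_val, Nat.bit_val]
    simp only [Nat.shiftRight_one]
    rcases Nat.mod_two_eq_zero_or_one n with h2 | h2 <;> · simp [h2]; omega

-- A's value for positive input, in closed form
theorem findComplement_pos (num : Int) (h : 0 < num) :
    findComplement num = 2 ^ PySem.Int.bitLength num - 1 - num := by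
  generalize hfuel : num.toNat = fuel
  induction fuel using Nat.strong_induction_on generalizing num with
  | _ fuel ih =>
    have hq : PySem.Int.floordiv num 2 = num / 2 :=
      PySem.Int.floordiv_eq_ediv_of_pos (by omega)
    have hr : PySem.Int.mod num 2 = num % 2 :=
      PySem.Int.mod_eq_emod_of_pos (by omega)
    have hbl := PySem.Int.bitLength_of_pos h
    rw [hq] at hbl
    by_cases h2 : 0 < num / 2
    · have hih := ih (num / 2).toNat (by omega) (num / 2) h2 rfl
      unfold findComplement
      rw [pvBitsA, if_pos h, hq, hr]
      simp only [List.map_cons]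
      rw [fold_rev_cons]
      unfold findComplement at hih
      simp only at hih
      rw [hih, hbl, pow_succ]
      have hbl2 : num / 2 < ((2 ^ PySem.Int.bitLength (num / 2) : Nat) : Int) := by
        have := PySem.Int.lt_two_pow_bitLength (num / 2)
        omega
      have hcast : ((2 : Int) ^ PySem.Int.bitLength (num / 2))
          = ((2 ^ PySem.Int.bitLength (num / 2) : Nat) : Int) := by push_cast; ring
      rw [hcast]
      omega
    · -- here num = 1: the loop runs once, the single flipped bit is 0
      have h1 : num = 1 := by omega
      subst h1
      have hb1 : PySem.Int.bitLength 1 = 1 := by decide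
      unfold findComplement
      rw [pvBitsA, if_pos (by norm_num), pvBitsA]
      norm_num [hq, hr, hb1]

-- B's value for positive input, in the same closed form
theorem findComplement_alt_pos (num : Int) (h : 0 < num) :
    findComplement_alt num = 2 ^ PySem.Int.bitLength num - 1 - num := by
  unfold findComplement_alt
  rw [if_neg (by omega)]
  have hlt : num.toNat < 2 ^ PySem.Int.bitLength num := by
    have := PySem.Int.lt_two_pow_bitLength num
    omega
  have hmask : ((1 : Int) <<< PySem.Int.bitLength num) - 1
      = ((2 ^ PySem.Int.bitLength num - 1 : Nat) : Int) := by
    rw [Int.shiftLeft_eq]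
    push_cast [Nat.one_le_two_pow]
    ring
  rw [hmask, PySem.Int.bxor_of_nonneg (by omega) (by positivity)]
  rw [Int.toNat_natCast]
  rw [xor_two_pow_sub_one _ num.toNat hlt]
  have hcast : ((2 : Int) ^ PySem.Int.bitLength num)
      = ((2 ^ PySem.Int.bitLength num : Nat) : Int) := by push_cast; ring
  rw [hcast]
  omega

-- ===== VERDICT (by name: the statement is the Claim_ definition above) =====
theorem findComplement_spec : Claim_equal_findComplement := by
  intro num _
  unfold Spec_findComplement
  by_cases h : 0 < num
  · rw [findComplement_pos num h, findComplement_alt_pos num h]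
  · unfold findComplement findComplement_alt
    rw [pvBitsA, if_neg h, if_pos (by omega)]
    simp
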